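-- pv_equiv track=rewrite | github.com/jarys/trezor-firmware | python/src/trezorlib/ethereum.py | parse_type_n
-- ===== SOURCE A (Python) =====
-- def parse_type_n(type_name: str) -> int:
--     """Parse N from type<N>.
--
--     Example: "uint256" -> 256
--     """
--     # TODO: we could use regex for this to take number from the end
--     accum = []
--     for c in type_name:
--         if c.isdigit():
--             accum.append(c)
--         else:
--             accum = []
--
--     # join collected digits into a number
--     return int("".join(accum))
-- ===== SOURCE B (Python) =====
-- import re
--
-- def parse_type_n(type_name: str) -> int:
--     """Parse N from type<N>.
--
--     Example: "uint256" -> 256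
--     """
--     return int(re.search(r"\d*\Z", type_name).group())
-- ===== Notes on version B (the rewrite author's own statement) =====
-- stated objective: idiomatic
-- what changed: Replaces the reset-on-non-digit accumulator loop with a single regex extraction of the trailing digit run (\d*\Z), whose empty match makes int('') raise ValueError exactly where A does.
-- outside the precondition, e.g. on parse_type_n('bytes'): A raises ValueError, B raises ValueError; on parse_type_n(''): A raises ValueError, B raises ValueError
import Mathlib
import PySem

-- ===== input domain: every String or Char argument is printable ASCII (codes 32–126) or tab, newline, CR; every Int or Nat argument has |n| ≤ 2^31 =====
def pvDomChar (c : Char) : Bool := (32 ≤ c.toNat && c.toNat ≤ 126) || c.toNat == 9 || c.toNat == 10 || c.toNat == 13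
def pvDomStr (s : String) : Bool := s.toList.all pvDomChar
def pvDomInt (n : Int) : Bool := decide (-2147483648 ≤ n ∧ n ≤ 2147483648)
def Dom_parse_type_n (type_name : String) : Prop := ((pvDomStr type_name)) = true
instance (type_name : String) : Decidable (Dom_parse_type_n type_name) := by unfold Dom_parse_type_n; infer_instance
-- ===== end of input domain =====

-- B replaces A's reset-on-non-digit accumulator loop by a direct extraction of the
-- trailing digit run (regex \d*\Z in Python); same O(n) cost, more idiomatic.

-- ===== PORT A =====
-- accum loop: append digit, reset on non-digit; then int("".join(accum))
def parse_type_n (type_name : String) : Int :=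
  let accum := type_name.toList.foldl
    (fun acc c => if PySem.Chars.isdigit c then acc ++ [c] else []) []
  (PySem.Int.ofChars? accum).getD 0   -- accum is all digits and (under Pre_) nonempty, so int() succeeds

-- ===== PORT B =====
-- re.search(r"\d*\Z", s).group() = the maximal trailing run of digits
def parse_type_n_alt (type_name : String) : Int :=
  let digits := (type_name.toList.reverse.takeWhile PySem.Chars.isdigit).reverse
  (PySem.Int.ofChars? digits).getD 0

-- ===== PRECONDITION & SPEC =====
-- Pre_ excludes strings whose last character is not an ASCII digit (or empty strings):
-- there both A and B reach int("") and raise ValueError.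
def Pre_parse_type_n (type_name : String) : Prop :=
  (type_name.toList.getLast?.map PySem.Chars.isdigit).getD false = true
instance (type_name : String) : Decidable (Pre_parse_type_n type_name) := by
  unfold Pre_parse_type_n; infer_instance
def pvWitness_parse_type_n : String := "uint256"

def Spec_parse_type_n (type_name : String) (out : Int) : Prop := out = parse_type_n_alt type_name
instance (type_name : String) (out : Int) : Decidable (Spec_parse_type_n type_name out) := by unfold Spec_parse_type_n; infer_instance

-- ===== CLAIM (what is proved, stated in full; the proofs are below) =====
def Claim_equal_parse_type_n : Prop := ∀ (type_name : String), Dom_parse_type_n type_name → Pre_parse_type_n type_name → Spec_parse_type_n type_name (parse_type_n type_name)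

-- ===== LEMMAS AND PROOFS =====

-- Characterisation of A's accumulator loop: after scanning l it holds either acc ++ l
-- (if everything was a digit) or the maximal trailing digit run of l.
theorem accum_loop (l acc : List Char) :
    l.foldl (fun acc c => if PySem.Chars.isdigit c then acc ++ [c] else []) acc
      = if l.all PySem.Chars.isdigit then acc ++ l
        else (l.reverse.takeWhile PySem.Chars.isdigit).reverse := by
  induction l using List.reverseRecOn generalizing acc with
  | nil => simp
  | append_singleton l c ih =>
      simp only [List.foldl_append, List.foldl_cons, List.foldl_nil, ih,
        List.all_append, List.all_cons, List.all_nil, List.reverse_append,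
        List.reverse_cons, List.reverse_nil, List.nil_append, List.singleton_append,
        List.takeWhile_cons]
      by_cases hc : PySem.Chars.isdigit c
      · by_cases hl : l.all PySem.Chars.isdigit <;> simp [hc, hl]
      · simp [hc]

-- ===== VERDICT (by name: the statement is the Claim_ definition above) =====
theorem parse_type_n_spec : Claim_equal_parse_type_n := by
  intro s _ _
  show parse_type_n s = parse_type_n_alt s
  unfold parse_type_n parse_type_n_alt
  rw [accum_loop]
  by_cases h : s.toList.all PySem.Chars.isdigit
  · have ht : List.takeWhile PySem.Chars.isdigit s.toList.reverse = s.toList.reverse :=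
      List.takeWhile_eq_self_iff.mpr (by simpa [List.all_eq_true] using h)
    simp [h, ht]
  · simp [h]
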